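-- pv_equiv track=rewrite | github.com/sedirmohammed/Implementation-A-Statistical-Method-for-Predicting-Quantitative-Variables-in-Association-Rule-Mining | python/rule_matching.py | reduce_rules_hierarchy
-- ===== SOURCE A (Python) =====
-- def reduce_icd_hierarchy(rule, max_depth):
--     items = rule.split(',')
--     reduced_items = []
--     for item in items:
--         if '_diagnose' in item:
--             base, suffix = item.split('_', 1)
--             if len(base) > 3:
--                 truncated = base[:3]
--                 if max_depth > 0:
--                     truncated += base[3:3 + max_depth]
--                 reduced_items.append(f"{truncated}_{suffix}")
--             else:
--                 reduced_items.append(item)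
--         else:
--             reduced_items.append(item)
--     return ','.join(reduced_items)
--
-- def reduce_rules_hierarchy(rules, max_depth):
--     reduced_rules = {}
--     for rule, content in rules.items():
--         reduced_rule = reduce_icd_hierarchy(rule, max_depth)
--         if reduced_rule in reduced_rules:
--             reduced_rules[reduced_rule]['icu_los'].extend(content['icu_los'])
--         else:
--             reduced_rules[reduced_rule] = content
--     return reduced_rules
-- ===== SOURCE B (Python) =====
-- def reduce_icd_hierarchy(rule, max_depth):
--     items = rule.split(',')
--     reduced_items = []
--     for item in items:
--         if '_diagnose' in item:
--             base, suffix = item.split('_', 1)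
--             if len(base) > 3:
--                 truncated = base[:3]
--                 if max_depth > 0:
--                     truncated += base[3:3 + max_depth]
--                 reduced_items.append(f"{truncated}_{suffix}")
--             else:
--                 reduced_items.append(item)
--         else:
--             reduced_items.append(item)
--     return ','.join(reduced_items)
--
-- def _merge_contents(contents):
--     first = contents[0]
--     for other in contents[1:]:
--         first['icu_los'].extend(other['icu_los'])
--     return first
--
-- def reduce_rules_hierarchy(rules, max_depth):
--     groups = {}
--     for rule, content in rules.items():
--         groups.setdefault(reduce_icd_hierarchy(rule, max_depth), []).append(content)
--     return {key: _merge_contents(contents) for key, contents in groups.items()}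
-- ===== Notes on version B (the rewrite author's own statement) =====
-- stated objective: alternative
-- what changed: B replaces A's single pass that interleaves the membership test with conditional in-place merging by a two-phase decomposition: it first groups all content dicts by their reduced key (setdefault/append, preserving first-encounter order), then in a second pass merges each group's icu_los lists into the group's first content dict.
import Mathlib
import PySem

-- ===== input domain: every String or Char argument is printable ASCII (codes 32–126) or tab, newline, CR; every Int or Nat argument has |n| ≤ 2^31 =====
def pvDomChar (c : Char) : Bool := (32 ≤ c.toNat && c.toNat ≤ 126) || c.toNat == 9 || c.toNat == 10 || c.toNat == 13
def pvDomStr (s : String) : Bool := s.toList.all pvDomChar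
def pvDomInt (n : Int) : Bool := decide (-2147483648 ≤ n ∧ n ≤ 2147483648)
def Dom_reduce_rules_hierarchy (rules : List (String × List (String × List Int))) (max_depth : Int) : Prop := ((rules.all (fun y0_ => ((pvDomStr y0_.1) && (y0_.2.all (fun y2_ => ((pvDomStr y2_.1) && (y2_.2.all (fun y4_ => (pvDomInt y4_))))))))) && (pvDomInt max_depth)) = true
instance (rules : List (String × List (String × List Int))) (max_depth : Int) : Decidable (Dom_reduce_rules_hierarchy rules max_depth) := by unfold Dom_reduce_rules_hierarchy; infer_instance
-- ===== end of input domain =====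

-- B groups the contents by reduced key first and merges each group in a second pass (same return
-- value as A's one-pass merge; in Python both A and B extend the first content dict of a group in
-- place, so the equivalence proved here is about the RETURN value).

-- ===== PORT A =====
-- shared helper reduce_icd_hierarchy (identical in A and B), ported step for step
def reduce_icd_item (item : String) (max_depth : Int) : String :=
  if PySem.Str.isIn "_diagnose" item then
    match PySem.Str.splitMax? item "_" 1 with
    | some (base :: suffix :: _) =>
      if PySem.Str.len base > 3 then
        let truncated := PySem.Str.slice base none (some 3)
        let truncated := if max_depth > 0 then
            PySem.Str.join "" [truncated, PySem.Str.slice base (some 3) (some (3 + max_depth))]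
          else truncated
        PySem.Str.join "" [truncated, "_", suffix]
      else item
    | _ => item  -- unreachable: '_diagnose' in item guarantees two parts
  else item

def reduce_icd_hierarchy (rule : String) (max_depth : Int) : String :=
  let items := (PySem.Str.split? rule ",").getD []  -- separator "," is nonempty, split? is always some
  PySem.Str.join "," (items.map (fun item => reduce_icd_item item max_depth))

-- first['icu_los'].extend(other['icu_los']) on association-list content dicts (shared by A and B)
def extend_icu (first other : List (String × List Int)) : List (String × List Int) :=
  ((PySem.Dict.mk first).modify "icu_los" []
    (fun l => l ++ (PySem.Dict.mk other).getD "icu_los" [])).items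

def reduce_rules_hierarchy (rules : List (String × List (String × List Int))) (max_depth : Int) : List (String × List (String × List Int)) :=
  (rules.foldl
    (fun (d : PySem.Dict String (List (String × List Int))) p =>
      let r := reduce_icd_hierarchy p.1 max_depth
      if d.contains r then d.modify r [] (fun c => extend_icu c p.2)
      else d.insert r p.2)
    PySem.Dict.empty).items

-- ===== PORT B =====
def merge_contents (cs : List (List (String × List Int))) : List (String × List Int) :=
  match cs with
  | [] => []  -- unreachable: groups are never empty (contents[0] in Python)
  | first :: rest => rest.foldl extend_icu first

def reduce_rules_hierarchy_alt (rules : List (String × List (String × List Int))) (max_depth : Int) : List (String × List (String × List Int)) :=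
  let groups := rules.foldl
    (fun (g : PySem.Dict String (List (List (String × List Int)))) p =>
      g.modify (reduce_icd_hierarchy p.1 max_depth) [] (fun cs => cs ++ [p.2]))
    PySem.Dict.empty
  groups.items.map (fun q => (q.1, merge_contents q.2))

-- ===== PRECONDITION & SPEC =====
-- Pre_ excludes exactly the inputs on which Python A raises KeyError: two entries whose keys reduce
-- to the same rule but whose content dicts do not both carry an 'icu_los' key (B raises there too).
def Pre_reduce_rules_hierarchy (rules : List (String × List (String × List Int))) (max_depth : Int) : Prop :=
  List.Pairwise (fun p q =>
    reduce_icd_hierarchy p.1 max_depth = reduce_icd_hierarchy q.1 max_depth →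
      ("icu_los" ∈ p.2.map Prod.fst ∧ "icu_los" ∈ q.2.map Prod.fst)) rules
instance (rules : List (String × List (String × List Int))) (max_depth : Int) : Decidable (Pre_reduce_rules_hierarchy rules max_depth) := by unfold Pre_reduce_rules_hierarchy; infer_instance

def pvWitness_reduce_rules_hierarchy : (List (String × List (String × List Int))) × Int :=
  ([("A1234_diagnose", [("icu_los", [1, 2])])], 0)

def Spec_reduce_rules_hierarchy (rules : List (String × List (String × List Int))) (max_depth : Int) (out : List (String × List (String × List Int))) : Prop := out = reduce_rules_hierarchy_alt rules max_depth
instance (rules : List (String × List (String × List Int))) (max_depth : Int) (out : List (String × List (String × List Int))) : Decidable (Spec_reduce_rules_hierarchy rules max_depth out) := by unfold Spec_reduce_rules_hierarchy; infer_instance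

-- ===== CLAIM (what is proved, stated in full; the proofs are below) =====
def Claim_equal_reduce_rules_hierarchy : Prop := ∀ (rules : List (String × List (String × List Int))) (max_depth : Int), Dom_reduce_rules_hierarchy rules max_depth → Pre_reduce_rules_hierarchy rules max_depth → Spec_reduce_rules_hierarchy rules max_depth (reduce_rules_hierarchy rules max_depth)

-- ===== LEMMAS AND PROOFS =====

-- A's loop body, named for the proofs (definitionally the lambda inside the port)
def stepA (md : Int) (d : PySem.Dict String (List (String × List Int))) (p : String × List (String × List Int)) : PySem.Dict String (List (String × List Int)) :=
  let r := reduce_icd_hierarchy p.1 md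
  if d.contains r then d.modify r [] (fun c => extend_icu c p.2)
  else d.insert r p.2

def keyOf (md : Int) (p : String × List (String × List Int)) : String :=
  reduce_icd_hierarchy p.1 md

-- the contents whose rule reduces to k, in order
def grp (md : Int) (rs : List (String × List (String × List Int))) (k : String) : List (List (String × List Int)) :=
  (rs.filter (fun p => reduce_icd_hierarchy p.1 md == k)).map (·.2)

lemma grp_cons (md : Int) (p : String × List (String × List Int)) (rs : List (String × List (String × List Int))) (k : String) :
    grp md (p :: rs) k =
      if reduce_icd_hierarchy p.1 md = k then p.2 :: grp md rs k else grp md rs k := by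
  simp [grp, List.filter_cons]
  split_ifs with h <;> simp_all

lemma A_fold_spec (md : Int) (rs : List (String × List (String × List Int))) :
    ∀ d : PySem.Dict String (List (String × List Int)),
      ((rs.foldl (stepA md) d).keys = PySem.Set.update d.keys (rs.map (keyOf md))) ∧
      (∀ k, (rs.foldl (stepA md) d).getD k [] =
        if d.contains k then (grp md rs k).foldl extend_icu (d.getD k [])
        else merge_contents (grp md rs k)) := by
  induction rs with
  | nil =>
    intro d
    refine ⟨by simp [PySem.Set.update_nil], ?_⟩
    intro k
    by_cases h : d.contains k = true
    · simp [h, grp]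
    · simp [grp, merge_contents, PySem.Dict.getD_of_not_contains d [] (by simpa using h), h]
  | cons p rs ih =>
    intro d
    set k0 := reduce_icd_hierarchy p.1 md with hk0
    by_cases hc : d.contains k0 = true
    · have hstep : stepA md d p = d.modify k0 [] (fun c => extend_icu c p.2) := by
        simp [stepA, ← hk0, hc]
      have hmem : k0 ∈ d.keys := (PySem.Dict.contains_iff_mem_keys d k0).mp hc
      obtain ⟨ihk, ihg⟩ := ih (d.modify k0 [] (fun c => extend_icu c p.2))
      constructor
      · simp only [List.foldl_cons, hstep, List.map_cons, PySem.Set.update_cons, ihk,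
          PySem.Dict.keys_modify, PySem.Dict.keys_insert_of_contains d _ hc,
          PySem.Set.add_of_mem hmem, keyOf, ← hk0]
      · intro k
        have := ihg k
        simp only [List.foldl_cons, hstep, this, PySem.Dict.contains_modify,
          PySem.Dict.getD_modify, grp_cons, ← hk0]
        by_cases hk : k = k0
        · subst hk
          simp [hc, List.foldl_cons]
        · have hkk : (k == k0) = false := by simp [hk]
          have hk' : ¬ k0 = k := fun h => hk h.symm
          simp [hkk, hk, hk']
    · have hcf : d.contains k0 = false := by simpa using hc
      have hstep : stepA md d p = d.insert k0 p.2 := by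
        simp [stepA, ← hk0, hcf]
      have hmem : k0 ∉ d.keys := fun h => by
        simp [(PySem.Dict.contains_iff_mem_keys d k0).mpr h] at hcf
      obtain ⟨ihk, ihg⟩ := ih (d.insert k0 p.2)
      constructor
      · simp only [List.foldl_cons, hstep, List.map_cons, PySem.Set.update_cons, ihk,
          PySem.Dict.keys_insert_of_not_contains d _ hcf,
          PySem.Set.add_of_not_mem hmem, keyOf, ← hk0]
      · intro k
        have := ihg k
        simp only [List.foldl_cons, hstep, this, PySem.Dict.contains_insert,
          PySem.Dict.getD_insert, grp_cons, ← hk0]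
        by_cases hk : k = k0
        · subst hk
          simp [hcf, merge_contents]
        · have hkk : (k == k0) = false := by simp [hk]
          have hk' : ¬ k0 = k := fun h => hk h.symm
          simp [hkk, hk, hk']

-- canonical form of A's result
lemma A_canonical (rules : List (String × List (String × List Int))) (md : Int) :
    reduce_rules_hierarchy rules md =
      (PySem.Set.ofList (rules.map (keyOf md))).map
        (fun k => (k, merge_contents (grp md rules k))) := by
  have hfold : reduce_rules_hierarchy rules md = (rules.foldl (stepA md) PySem.Dict.empty).items := rfl
  obtain ⟨hk, hg⟩ := A_fold_spec md rules PySem.Dict.empty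
  have hkeys : (rules.foldl (stepA md) PySem.Dict.empty).keys = PySem.Set.ofList (rules.map (keyOf md)) := by
    simpa [PySem.Dict.keys_empty, PySem.Set.update_nil_left] using hk
  have hnd : (rules.foldl (stepA md) PySem.Dict.empty).keys.Nodup := by
    rw [hkeys]; exact PySem.Set.nodup_ofList _
  rw [hfold, PySem.Dict.items_eq_map_keys _ hnd [], hkeys]
  refine List.map_congr_left (fun k _ => ?_)
  have := hg k
  simp [PySem.Dict.contains_empty] at this
  rw [this]

-- canonical form of B's result
lemma B_canonical (rules : List (String × List (String × List Int))) (md : Int) :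
    reduce_rules_hierarchy_alt rules md =
      (PySem.Set.ofList (rules.map (keyOf md))).map
        (fun k => (k, merge_contents (grp md rules k))) := by
  set G := rules.foldl
    (fun (g : PySem.Dict String (List (List (String × List Int)))) p =>
      g.modify (reduce_icd_hierarchy p.1 md) [] (fun cs => cs ++ [p.2]))
    PySem.Dict.empty with hG
  have halt : reduce_rules_hierarchy_alt rules md = G.items.map (fun q => (q.1, merge_contents q.2)) := rfl
  rw [halt]
  have hkeys : G.keys = PySem.Set.ofList (rules.map (keyOf md)) := by
    rw [hG, PySem.Dict.keys_foldl_modify_key rules (fun p => reduce_icd_hierarchy p.1 md) []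
      (fun _ p => (fun cs => cs ++ [p.2])) PySem.Dict.empty]
    simp only [PySem.Dict.keys_empty, PySem.Set.update_nil_left]
    rfl
  have hnd : G.keys.Nodup := by rw [hkeys]; exact PySem.Set.nodup_ofList _
  have hgetD : ∀ k, G.getD k [] = grp md rules k := by
    intro k
    have hmap : G = (rules.map (fun p => (reduce_icd_hierarchy p.1 md, p.2))).foldl
        (fun (g : PySem.Dict String (List (List (String × List Int)))) q =>
          g.modify q.1 [] (fun cs => cs ++ [q.2])) PySem.Dict.empty := by
      rw [hG, List.foldl_map]
    rw [hmap, PySem.Dict.getD_foldl_modify_append]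
    simp [PySem.Dict.getD_empty, grp, List.filter_map, Function.comp_def]
  rw [PySem.Dict.items_eq_map_keys _ hnd [], hkeys, List.map_map]
  refine List.map_congr_left (fun k _ => ?_)
  simp [hgetD k]

-- ===== VERDICT (by name: the statement is the Claim_ definition above) =====
theorem reduce_rules_hierarchy_spec : Claim_equal_reduce_rules_hierarchy := by
  intro rules md _ _
  unfold Spec_reduce_rules_hierarchy
  rw [A_canonical, B_canonical]
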